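-- pv_equiv track=rewrite | github.com/ScumbagJones/Webscraper-Site-Analyzer | design_system_metrics.py | _detect_radius_pattern_from_values
-- ===== SOURCE A (Python) =====
-- from typing import Dict, List, Tuple
--
-- def _detect_radius_pattern_from_values(values: List[int]) -> str:
--     """Classify the radius scale into a human-readable pattern string."""
--     if not values:
--         return 'No radius scale'
--     if all(v % 4 == 0 for v in values[:5]):
--         return '4px base system'
--     if all(v % 2 == 0 for v in values[:5]):
--         return '2px base system'
--     return 'Custom scale'
-- ===== SOURCE B (Python) =====
-- def _detect_radius_pattern_from_values(values):
--     """Classify the radius scale into a human-readable pattern string."""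
--     if not values:
--         return 'No radius scale'
--     tier = _min_tier(values, 5)
--     if tier == 4:
--         return '4px base system'
--     if tier == 2:
--         return '2px base system'
--     return 'Custom scale'
--
--
-- def _min_tier(vs, k):
--     """Smallest per-value tier (4/2/1) among the first k values; 4 on empty."""
--     if k == 0 or not vs:
--         return 4
--     v = vs[0]
--     t = 4 if v % 4 == 0 else 2 if v % 2 == 0 else 1
--     return min(t, _min_tier(vs[1:], k - 1))
-- ===== Notes on version B (the rewrite author's own statement) =====
-- stated objective: alternative
-- what changed: Replaces A's two separate all(v % k == 0) scans over values[:5] by a single recursive pass that maps each value to a tier (4/2/1) and takes the minimum tier, then classifies from that aggregate.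
import Mathlib
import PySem

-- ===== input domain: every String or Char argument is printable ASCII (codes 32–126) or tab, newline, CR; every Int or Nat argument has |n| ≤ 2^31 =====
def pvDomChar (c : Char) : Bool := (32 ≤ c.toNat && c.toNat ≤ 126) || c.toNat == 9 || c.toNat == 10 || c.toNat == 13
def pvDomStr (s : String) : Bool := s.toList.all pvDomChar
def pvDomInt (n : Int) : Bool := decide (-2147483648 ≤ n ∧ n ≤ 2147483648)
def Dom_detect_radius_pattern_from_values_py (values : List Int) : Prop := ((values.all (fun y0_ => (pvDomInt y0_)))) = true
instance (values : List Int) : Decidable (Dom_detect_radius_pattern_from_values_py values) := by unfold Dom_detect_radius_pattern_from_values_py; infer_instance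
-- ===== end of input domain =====

-- B replaces A's two all(v % k == 0) scans by one recursive pass mapping each of the
-- first five values to a tier (4/2/1) and classifying from the minimum tier (alternative).


-- ===== PORT A =====
def detect_radius_pattern_from_values_py (values : List Int) : String :=
  if values = [] then "No radius scale"
  else if (PySem.List.slice values none (some 5)).all (fun v => PySem.Int.mod v 4 == 0) then
    "4px base system"
  else if (PySem.List.slice values none (some 5)).all (fun v => PySem.Int.mod v 2 == 0) then
    "2px base system"
  else "Custom scale"

-- ===== PORT B =====
-- per-value tier: 4 if v % 4 == 0 else 2 if v % 2 == 0 else 1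
def pvTier (v : Int) : Int :=
  if PySem.Int.mod v 4 == 0 then 4 else if PySem.Int.mod v 2 == 0 then 2 else 1

-- _min_tier(vs, k): smallest tier among the first k values; 4 on empty
def pvMinTier : List Int → Nat → Int
  | _, 0 => 4
  | [], _ => 4
  | v :: rest, k + 1 => min (pvTier v) (pvMinTier rest k)

def detect_radius_pattern_from_values_py_alt (values : List Int) : String :=
  if values = [] then "No radius scale"
  else
    let tier := pvMinTier values 5
    if tier == 4 then "4px base system"
    else if tier == 2 then "2px base system"
    else "Custom scale"

-- ===== PRECONDITION & SPEC =====
def Spec_detect_radius_pattern_from_values_py (values : List Int) (out : String) : Prop := out = detect_radius_pattern_from_values_py_alt values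
instance (values : List Int) (out : String) : Decidable (Spec_detect_radius_pattern_from_values_py values out) := by unfold Spec_detect_radius_pattern_from_values_py; infer_instance

-- ===== CLAIM (what is proved, stated in full; the proofs are below) =====
def Claim_equal_detect_radius_pattern_from_values_py : Prop := ∀ (values : List Int), Dom_detect_radius_pattern_from_values_py values → Spec_detect_radius_pattern_from_values_py values (detect_radius_pattern_from_values_py values)

-- ===== LEMMAS AND PROOFS =====

theorem mod_pos_eq_zero_iff (v : Int) (k : Int) (hk : 0 < k) : (PySem.Int.mod v k == 0) = true ↔ k ∣ v := by
  rw [PySem.Int.mod_eq_emod_of_pos hk]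
  constructor
  · intro h; exact Int.dvd_of_emod_eq_zero (by simpa using h)
  · intro h; simp [Int.emod_eq_zero_of_dvd h]

theorem pvTier_eq_four_iff (v : Int) : pvTier v = 4 ↔ (PySem.Int.mod v 4 == 0) = true := by
  unfold pvTier; split_ifs with h1 h2 <;> simp_all

theorem pvTier_ge_two_iff (v : Int) : 2 ≤ pvTier v ↔ (PySem.Int.mod v 2 == 0) = true := by
  unfold pvTier
  split_ifs with h1 h2
  · have h4 : (4:Int) ∣ v := (mod_pos_eq_zero_iff v 4 (by norm_num)).mp h1
    have h2' : (2:Int) ∣ v := dvd_trans (by norm_num) h4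
    exact ⟨fun _ => (mod_pos_eq_zero_iff v 2 (by norm_num)).mpr h2', fun _ => by norm_num⟩
  · exact ⟨fun _ => h2, fun _ => by norm_num⟩
  · exact ⟨fun h => absurd h (by norm_num), fun hh => absurd hh h2⟩

theorem pvMinTier_cases (l : List Int) (k : Nat) :
    pvMinTier l k = 4 ∨ pvMinTier l k = 2 ∨ pvMinTier l k = 1 := by
  induction l generalizing k with
  | nil => cases k <;> simp [pvMinTier]
  | cons v rest ih =>
    cases k with
    | zero => simp [pvMinTier]
    | succ n =>
      have hv : pvTier v = 4 ∨ pvTier v = 2 ∨ pvTier v = 1 := by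
        unfold pvTier; split_ifs <;> simp
      rcases ih n with h | h | h <;> rcases hv with hv | hv | hv <;>
        simp [pvMinTier, hv, h]

theorem pvMinTier_eq_four_iff (l : List Int) (k : Nat) :
    pvMinTier l k = 4 ↔ ∀ v ∈ l.take k, (PySem.Int.mod v 4 == 0) = true := by
  induction l generalizing k with
  | nil => cases k <;> simp [pvMinTier]
  | cons v rest ih =>
    cases k with
    | zero => simp [pvMinTier]
    | succ n =>
      simp only [pvMinTier, List.take_succ_cons, List.mem_cons]
      constructor
      · intro h
        have hv : pvTier v = 4 ∧ pvMinTier rest n = 4 := by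
          have h1 := pvMinTier_cases rest n
          have h2 : pvTier v = 4 ∨ pvTier v = 2 ∨ pvTier v = 1 := by
            unfold pvTier; split_ifs <;> simp
          constructor <;> (rcases h1 with a|a|a <;> rcases h2 with b|b|b <;>
            simp [a, b] at h ⊢)
        intro w hw
        rcases hw with hw | hw
        · exact hw ▸ (pvTier_eq_four_iff v).mp hv.1
        · exact (ih n).mp hv.2 w hw
      · intro h
        have hv : pvTier v = 4 := (pvTier_eq_four_iff v).mpr (h v (Or.inl rfl))
        have hr : pvMinTier rest n = 4 := (ih n).mpr (fun w hw => h w (Or.inr hw))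
        rw [hv, hr]; norm_num

theorem pvMinTier_ge_two_iff (l : List Int) (k : Nat) :
    2 ≤ pvMinTier l k ↔ ∀ v ∈ l.take k, (PySem.Int.mod v 2 == 0) = true := by
  induction l generalizing k with
  | nil => cases k <;> simp [pvMinTier]
  | cons v rest ih =>
    cases k with
    | zero => simp [pvMinTier]
    | succ n =>
      simp only [pvMinTier, List.take_succ_cons, List.mem_cons, le_min_iff]
      rw [pvTier_ge_two_iff, ih]
      constructor
      · rintro ⟨h1, h2⟩ w hw
        rcases hw with hw | hw
        · exact hw ▸ h1
        · exact h2 w hw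
      · intro h
        exact ⟨h v (Or.inl rfl), fun w hw => h w (Or.inr hw)⟩

-- ===== VERDICT (by name: the statement is the Claim_ definition above) =====
theorem detect_radius_pattern_from_values_py_spec : Claim_equal_detect_radius_pattern_from_values_py := by
  intro values _
  unfold Spec_detect_radius_pattern_from_values_py
  unfold detect_radius_pattern_from_values_py detect_radius_pattern_from_values_py_alt
  by_cases hnil : values = []
  · simp [hnil]
  · simp only [hnil, if_false]
    have hsl : PySem.List.slice values none (some 5) = values.take 5 := by
      have := PySem.List.slice_to_natCast values 5
      simpa using this
    rw [hsl]
    rcases pvMinTier_cases values 5 with h | h | h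
    · have h4 : ∀ v ∈ values.take 5, (PySem.Int.mod v 4 == 0) = true :=
        (pvMinTier_eq_four_iff values 5).mp h
      rw [if_pos (List.all_eq_true.mpr h4), h]; norm_num
    · have hn4 : ¬ ((values.take 5).all (fun v => PySem.Int.mod v 4 == 0)) = true := by
        rw [List.all_eq_true, ← pvMinTier_eq_four_iff]; omega
      have h2 : ∀ v ∈ values.take 5, (PySem.Int.mod v 2 == 0) = true :=
        (pvMinTier_ge_two_iff values 5).mp (by omega)
      rw [if_neg hn4, if_pos (List.all_eq_true.mpr h2), h]; norm_num
    · have hn4 : ¬ ((values.take 5).all (fun v => PySem.Int.mod v 4 == 0)) = true := by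
        rw [List.all_eq_true, ← pvMinTier_eq_four_iff]; omega
      have hn2 : ¬ ((values.take 5).all (fun v => PySem.Int.mod v 2 == 0)) = true := by
        rw [List.all_eq_true, ← pvMinTier_ge_two_iff]; omega
      rw [if_neg hn4, if_neg hn2, h]; norm_num
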